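-- pv_equiv track=rewrite | github.com/Carnot-EBM/carnot-ebm | python/carnot/pipeline/generation.py | _count_borrows
-- ===== SOURCE A (Python) =====
-- def _count_borrows(a: int, b: int) -> int:
--     """Count borrow operations in the subtraction |a| - |b|.
--
--     **Detailed explanation for engineers:**
--         Simulates column-by-column subtraction from least significant digit,
--         operating on absolute values. When the digit of the minuend is smaller
--         than the digit of the subtrahend plus any pending borrow, the algorithm
--         borrows from the next column -- incrementing the count. Cascade borrows
--         occur in cases like 1000 - 1 = 999 (three borrows: units, tens,
--         hundreds all need to borrow from the next column in turn).
--
--         If |a| < |b| we swap them so the algorithm always subtracts the smaller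
--         from the larger; the negative-result detection is handled separately
--         by the caller (CarryChainConstraint) via the sign check.
--
--     Args:
--         a: Minuend (may be negative; absolute value is used).
--         b: Subtrahend (may be negative; absolute value is used).
--
--     Returns:
--         Number of borrow operations (0 = no borrows, 2+ = cascade borrows).
--     """
--     a, b = abs(a), abs(b)
--     # Always subtract smaller from larger for borrow-counting purposes.
--     if a < b:
--         a, b = b, a
--     count = 0
--     borrow = 0
--     while b > 0 or borrow > 0:
--         digit_a = a % 10
--         digit_b = b % 10
--         if digit_a < digit_b + borrow:
--             count += 1
--             borrow = 1
--         else: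
--             borrow = 0
--         a //= 10
--         b //= 10
--     return count
-- ===== SOURCE B (Python) =====
-- def _ndigits(n: int) -> int:
--     d = 0
--     while n > 0:
--         d += 1
--         n //= 10
--     return d
--
--
-- def _count_borrows(a: int, b: int) -> int:
--     a, b = abs(a), abs(b)
--     hi, lo = (a, b) if a >= b else (b, a)
--     # A borrow occurs at digit position k iff the (k+1)-digit suffix of the
--     # larger operand is smaller than that of the smaller one; each position is
--     # tested independently, no propagating borrow state.
--     return sum(1 for k in range(_ndigits(hi)) if hi % 10 ** (k + 1) < lo % 10 ** (k + 1))
-- ===== Notes on version B (the rewrite author's own statement) =====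
-- stated objective: alternative
-- what changed: Replaces A's sequential digit loop with a propagating borrow flag by a stateless comprehension: after computing the digit count of the larger operand, it counts positions k where hi % 10**(k+1) < lo % 10**(k+1), deciding each position by one independent modular suffix comparison.
import Mathlib
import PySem

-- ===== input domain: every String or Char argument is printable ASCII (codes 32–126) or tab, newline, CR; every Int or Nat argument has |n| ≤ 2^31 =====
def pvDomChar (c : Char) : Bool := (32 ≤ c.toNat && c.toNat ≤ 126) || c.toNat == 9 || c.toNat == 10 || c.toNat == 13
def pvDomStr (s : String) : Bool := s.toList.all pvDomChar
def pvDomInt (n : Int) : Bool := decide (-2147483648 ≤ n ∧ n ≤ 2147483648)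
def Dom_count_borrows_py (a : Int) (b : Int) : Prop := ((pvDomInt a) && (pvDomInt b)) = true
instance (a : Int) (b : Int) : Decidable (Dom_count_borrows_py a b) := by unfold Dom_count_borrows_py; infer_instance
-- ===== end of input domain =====

-- B replaces A's sequential borrow cascade (propagating flag) by a stateless
-- count over digit positions of independent modular suffix comparisons
-- (alternative algorithm, same asymptotic cost).

-- ===== PORT A =====
-- A's while-loop, ported with explicit fuel; the fuel given at the call site is
-- provably sufficient (the loop runs at most max(|a|,|b|)+1 iterations).
def pvLoopA (fuel : Nat) (a b borrow count : Int) : Int :=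
  match fuel with
  | 0 => count
  | fuel + 1 =>
    if b > 0 ∨ borrow > 0 then
      let digit_a := PySem.Int.mod a 10
      let digit_b := PySem.Int.mod b 10
      if digit_a < digit_b + borrow then
        pvLoopA fuel (PySem.Int.floordiv a 10) (PySem.Int.floordiv b 10) 1 (count + 1)
      else
        pvLoopA fuel (PySem.Int.floordiv a 10) (PySem.Int.floordiv b 10) 0 count
    else count

def count_borrows_py (a : Int) (b : Int) : Int :=
  let a1 := |a|
  let b1 := |b|
  let a2 := if a1 < b1 then b1 else a1
  let b2 := if a1 < b1 then a1 else b1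
  pvLoopA (a2.natAbs + b2.natAbs + 1) a2 b2 0 0

-- ===== PORT B =====
-- Source B's helper _ndigits, ported with explicit fuel (sufficient at the call site).
def pvND (fuel : Nat) (n d : Int) : Int :=
  match fuel with
  | 0 => d
  | fuel + 1 =>
    if n > 0 then pvND fuel (PySem.Int.floordiv n 10) (d + 1) else d

-- Source B's comprehension 'sum(1 for k in range(_ndigits(hi)) if hi % 10**(k+1) < lo % 10**(k+1))'
-- as a fold over the range; the exponent (k+1).toNat is exact since k ≥ 0 in the range.
def count_borrows_py_alt (a : Int) (b : Int) : Int :=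
  let a1 := |a|
  let b1 := |b|
  let hi := if a1 ≥ b1 then a1 else b1
  let lo := if a1 ≥ b1 then b1 else a1
  (PySem.List.pyRange 0 (pvND (hi.natAbs + 1) hi 0) 1).foldl
    (fun c k =>
      if PySem.Int.mod hi ((10 : Int) ^ (k + 1).toNat) <
         PySem.Int.mod lo ((10 : Int) ^ (k + 1).toNat) then c + 1 else c) 0

-- ===== PRECONDITION & SPEC =====
def Spec_count_borrows_py (a : Int) (b : Int) (out : Int) : Prop := out = count_borrows_py_alt a b
instance (a : Int) (b : Int) (out : Int) : Decidable (Spec_count_borrows_py a b out) := by unfold Spec_count_borrows_py; infer_instance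

-- ===== CLAIM (what is proved, stated in full; the proofs are below) =====
def Claim_equal_count_borrows_py : Prop := ∀ (a : Int) (b : Int), Dom_count_borrows_py a b → Spec_count_borrows_py a b (count_borrows_py a b)

-- ===== LEMMAS AND PROOFS =====

-- Nat-level mirror of A's loop.
def pvLoopAN (fuel a b borrow count : Nat) : Nat :=
  match fuel with
  | 0 => count
  | fuel + 1 =>
    if 0 < b ∨ 0 < borrow then
      if a % 10 < b % 10 + borrow then
        pvLoopAN fuel (a / 10) (b / 10) 1 (count + 1)
      else
        pvLoopAN fuel (a / 10) (b / 10) 0 count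
    else count

-- Nat-level mirror of B's digit counter.
def pvNDN (fuel n : Nat) : Nat :=
  match fuel with
  | 0 => 0
  | fuel + 1 => if 0 < n then pvNDN fuel (n / 10) + 1 else 0

-- numeral-divisor cast bridges for the PySem primitives
lemma pvModc (a p : Nat) (hp : 0 < (p : Int)) : PySem.Int.mod (a : Int) (p : Int) = ((a % p : Nat) : Int) := by
  rw [PySem.Int.mod_eq_emod_of_pos hp]; omega

lemma pvDivc (a p : Nat) (hp : 0 < (p : Int)) : PySem.Int.floordiv (a : Int) (p : Int) = ((a / p : Nat) : Int) := by
  rw [PySem.Int.floordiv_eq_ediv_of_pos hp]; omega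

lemma pvModc10 (a : Nat) : PySem.Int.mod (a : Int) 10 = ((a % 10 : Nat) : Int) := by
  have := pvModc a 10 (by norm_num)
  simpa using this

lemma pvDivc10 (a : Nat) : PySem.Int.floordiv (a : Int) 10 = ((a / 10 : Nat) : Int) := by
  have := pvDivc a 10 (by norm_num)
  simpa using this

lemma pvLoopA_eq_nat : ∀ (f : Nat) (a b borrow count : Nat),
    pvLoopA f (a : Int) (b : Int) (borrow : Int) (count : Int) = (pvLoopAN f a b borrow count : Int) := by
  intro f
  induction f with
  | zero => intro a b borrow count; simp [pvLoopA, pvLoopAN]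
  | succ f ih =>
    intro a b borrow count
    simp only [pvLoopA, pvLoopAN, pvModc10, pvDivc10]
    have hcond : ((b : Int) > 0 ∨ (borrow : Int) > 0) ↔ (0 < b ∨ 0 < borrow) := by
      constructor <;> intro h <;> rcases h with h | h <;> [left; right; left; right] <;> exact_mod_cast h
    have hcmp : ((a % 10 : Nat) : Int) < ((b % 10 : Nat) : Int) + (borrow : Int) ↔ a % 10 < b % 10 + borrow := by
      constructor <;> intro h <;> exact_mod_cast h
    by_cases h1 : 0 < b ∨ 0 < borrow
    · rw [if_pos (hcond.mpr h1), if_pos h1]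
      by_cases h2 : a % 10 < b % 10 + borrow
      · rw [if_pos (hcmp.mpr h2), if_pos h2]
        have := ih (a / 10) (b / 10) 1 (count + 1)
        simpa using this
      · rw [if_neg (fun hc => h2 (hcmp.mp hc)), if_neg h2]
        exact ih (a / 10) (b / 10) 0 count
    · rw [if_neg (fun hc => h1 (hcond.mp hc)), if_neg h1]

lemma pvND_eq_nat : ∀ (f n : Nat) (d : Int), pvND f (n : Int) d = d + (pvNDN f n : Int) := by
  intro f
  induction f with
  | zero => intro n d; simp [pvND, pvNDN]
  | succ f ih =>
    intro n d
    simp only [pvND, pvNDN, pvDivc10]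
    by_cases h : 0 < n
    · rw [if_pos (by exact_mod_cast h), if_pos h, ih]
      push_cast; ring
    · rw [if_neg (by exact_mod_cast h), if_neg h]
      simp

-- The fueled digit counter bounds its argument: n < 10 ^ pvNDN f n when f > n.
lemma pvNDN_bound : ∀ (f n : Nat), n + 1 ≤ f → n < 10 ^ pvNDN f n := by
  intro f
  induction f with
  | zero => intro n h; omega
  | succ f ih =>
    intro n h
    simp only [pvNDN]
    by_cases hn : 0 < n
    · rw [if_pos hn]
      have hlt : n / 10 < n := Nat.div_lt_self hn (by norm_num)
      have := ih (n / 10) (by omega)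
      calc n < 10 * (n / 10) + 10 := by omega
        _ ≤ 10 * 10 ^ pvNDN f (n / 10) := by omega
        _ = 10 ^ (pvNDN f (n / 10) + 1) := by ring
    · rw [if_neg hn]; omega

-- Decomposition of a suffix: a % 10^(k+1) = (a / 10^k % 10) * 10^k + a % 10^k.
lemma suffix_decomp (a k : Nat) :
    a % 10 ^ (k + 1) = (a / 10 ^ k % 10) * 10 ^ k + a % 10 ^ k := by
  conv_lhs => rw [pow_succ, Nat.mod_mul]
  ring

-- The borrow-step recurrence: the borrow out of column k is the suffix test.
lemma borrow_step (a b k : Nat) :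
    (a % 10 ^ (k + 1) < b % 10 ^ (k + 1)) ↔
      (a / 10 ^ k % 10 < b / 10 ^ k % 10 + (if a % 10 ^ k < b % 10 ^ k then 1 else 0)) := by
  have hP : 0 < 10 ^ k := Nat.pow_pos (by norm_num)
  have hra : a % 10 ^ k < 10 ^ k := Nat.mod_lt _ hP
  have hrb : b % 10 ^ k < 10 ^ k := Nat.mod_lt _ hP
  rw [suffix_decomp a k, suffix_decomp b k]
  set da := a / 10 ^ k % 10
  set db := b / 10 ^ k % 10
  set ra := a % 10 ^ k
  set rb := b % 10 ^ k
  rcases lt_trichotomy da db with h | h | h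
  · have : da * 10 ^ k + 10 ^ k ≤ db * 10 ^ k := by
      have := Nat.succ_le_of_lt h
      calc da * 10 ^ k + 10 ^ k = (da + 1) * 10 ^ k := by ring
        _ ≤ db * 10 ^ k := Nat.mul_le_mul_right _ this
    constructor <;> intro _
    · omega
    · omega
  · rw [h]
    constructor <;> intro h2
    · have : ra < rb := by omega
      simp [this]
    · split_ifs at h2 with h3
      · omega
      · omega
  · have : db * 10 ^ k + 10 ^ k ≤ da * 10 ^ k := by
      have := Nat.succ_le_of_lt h
      calc db * 10 ^ k + 10 ^ k = (db + 1) * 10 ^ k := by ring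
        _ ≤ da * 10 ^ k := Nat.mul_le_mul_right _ this
    constructor <;> intro h2
    · omega
    · split_ifs at h2 <;> omega

-- Main lemma: A's cascade from column k equals the independent per-position
-- suffix count over the remaining positions k, …, D-1 (D any digit bound of a).
lemma A_eq_count : ∀ (f k D a b count : Nat), b ≤ a → a < 10 ^ D → k ≤ D →
    a / 10 ^ k + b / 10 ^ k + 1 ≤ f →
    pvLoopAN f (a / 10 ^ k) (b / 10 ^ k) (if a % 10 ^ k < b % 10 ^ k then 1 else 0) count
      = count + (List.range' k (D - k)).countP (fun j => decide (a % 10 ^ (j + 1) < b % 10 ^ (j + 1))) := by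
  intro f
  induction f with
  | zero => intro k D a b count _ _ _ h; exact absurd h (Nat.not_succ_le_zero _)
  | succ f ih =>
    intro k D a b count hba haD hkD hfuel
    have hP : 0 < 10 ^ k := Nat.pow_pos (by norm_num)
    simp only [pvLoopAN]
    by_cases hA : 0 < b / 10 ^ k ∨ 0 < (if a % 10 ^ k < b % 10 ^ k then 1 else 0)
    · -- A steps: 10^k ≤ a, hence k < D
      have hka : 10 ^ k ≤ a := by
        rcases hA with h | h
        · have : 10 ^ k ≤ b := by
            have := (Nat.le_div_iff_mul_le hP).mp h
            simpa using this
          omega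
        · split_ifs at h with h2
          · by_contra hc
            push_neg at hc
            have ha : a % 10 ^ k = a := Nat.mod_eq_of_lt hc
            have hb : b % 10 ^ k = b := Nat.mod_eq_of_lt (by omega)
            omega
          · omega
      have hkD' : k < D := by
        have : (10 : Nat) ^ k < 10 ^ D := lt_of_le_of_lt hka haD
        exact (Nat.pow_lt_pow_iff_right (by norm_num)).mp this
      rw [if_pos hA]
      have hdiv10a : a / 10 ^ k / 10 = a / 10 ^ (k + 1) := by
        rw [Nat.div_div_eq_div_mul, pow_succ]
      have hdiv10b : b / 10 ^ k / 10 = b / 10 ^ (k + 1) := by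
        rw [Nat.div_div_eq_div_mul, pow_succ]
      have hstep := borrow_step a b k
      have hfuel' : a / 10 ^ (k + 1) + b / 10 ^ (k + 1) + 1 ≤ f := by
        have h3 : 0 < a / 10 ^ k := (Nat.le_div_iff_mul_le hP).mpr (by simpa using hka)
        have h5 : a / 10 ^ (k + 1) < a / 10 ^ k := by
          rw [← hdiv10a]; exact Nat.div_lt_self h3 (by norm_num)
        have h2 : b / 10 ^ (k + 1) ≤ b / 10 ^ k := by
          rw [← hdiv10b]; exact Nat.div_le_self _ _
        omega
      have hrange : List.range' k (D - k) = k :: List.range' (k + 1) (D - (k + 1)) := by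
        have : D - k = (D - (k + 1)) + 1 := by omega
        rw [this, List.range'_succ]
      rw [hrange, List.countP_cons]
      by_cases hc : a / 10 ^ k % 10 < b / 10 ^ k % 10 + (if a % 10 ^ k < b % 10 ^ k then 1 else 0)
      · rw [if_pos hc, hdiv10a, hdiv10b]
        have hsuf : a % 10 ^ (k + 1) < b % 10 ^ (k + 1) := hstep.mpr hc
        have := ih (k + 1) D a b (count + 1) hba haD hkD' hfuel'
        rw [if_pos hsuf] at this
        rw [this]
        simp [hsuf]
        ring
      · rw [if_neg hc, hdiv10a, hdiv10b]
        have hsuf : ¬ (a % 10 ^ (k + 1) < b % 10 ^ (k + 1)) := fun h => hc (hstep.mp h)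
        have := ih (k + 1) D a b count hba haD hkD' hfuel'
        rw [if_neg hsuf] at this
        rw [this]
        simp [hsuf]
    · -- A stops: every remaining position contributes nothing.
      rw [if_neg hA]
      push_neg at hA
      obtain ⟨h1, h2⟩ := hA
      have hb0 : b / 10 ^ k = 0 := Nat.le_zero.mp h1
      have hblt : b < 10 ^ k := ((Nat.div_eq_zero_iff).mp hb0).resolve_left hP.ne'
      have hnb : ¬ (a % 10 ^ k < b % 10 ^ k) := by
        split_ifs at h2 with h3
        · omega
        · exact h3
      have hbmod : b % 10 ^ k = b := Nat.mod_eq_of_lt hblt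
      have hzero : (List.range' k (D - k)).countP (fun j => decide (a % 10 ^ (j + 1) < b % 10 ^ (j + 1))) = 0 := by
        apply List.countP_eq_zero.mpr
        intro j hj
        have hjk : k ≤ j := by
          have := (List.mem_range'_1.mp hj).1
          omega
        have hdvd : (10 : Nat) ^ k ∣ 10 ^ (j + 1) := pow_dvd_pow 10 (by omega)
        have hmono : a % 10 ^ k ≤ a % 10 ^ (j + 1) := by
          have h := Nat.mod_mod_of_dvd a hdvd
          calc a % 10 ^ k = a % 10 ^ (j + 1) % 10 ^ k := h.symm
            _ ≤ a % 10 ^ (j + 1) := Nat.mod_le _ _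
        have hbj : b % 10 ^ (j + 1) = b := by
          apply Nat.mod_eq_of_lt
          exact lt_of_lt_of_le hblt (Nat.pow_le_pow_right (by norm_num) (by omega))
        simp only [decide_eq_true_eq]
        omega
      rw [hzero]
      omega

-- B's fold over the range of positions counts exactly the suffix tests.
lemma B_fold_eq (hiN loN : Nat) : ∀ (l : List Nat) (c : Int),
    (l.map (fun (k : Nat) => (0 : Int) + (k : Int))).foldl
      (fun c k =>
        if PySem.Int.mod (hiN : Int) ((10 : Int) ^ (k + 1).toNat) <
           PySem.Int.mod (loN : Int) ((10 : Int) ^ (k + 1).toNat) then c + 1 else c) c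
      = c + (l.countP (fun k => decide (hiN % 10 ^ (k + 1) < loN % 10 ^ (k + 1))) : Int) := by
  intro l
  induction l with
  | nil => intro c; simp
  | cons k l ih =>
    intro c
    have h10 : ((10 : Int) ^ ((0 : Int) + (k : Int) + 1).toNat) = ((10 ^ (k + 1) : Nat) : Int) := by
      have htn : ((0 : Int) + (k : Int) + 1).toNat = k + 1 := by omega
      rw [htn]; push_cast; ring
    have hpos : (0 : Int) < ((10 ^ (k + 1) : Nat) : Int) := by positivity
    rw [List.map_cons, List.foldl_cons, List.countP_cons]
    rw [h10, pvModc hiN _ hpos, pvModc loN _ hpos]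
    by_cases h : hiN % 10 ^ (k + 1) < loN % 10 ^ (k + 1)
    · rw [if_pos (by exact_mod_cast h), ih]
      simp [h]
      ring
    · rw [if_neg (fun hc => h (by exact_mod_cast hc)), ih]
      simp [h]

-- The two ports agree, via the common Nat-level suffix count.
lemma count_eq_core (hiN loN : Nat) (hle : loN ≤ hiN) (fA : Nat) (hfA : hiN + loN + 1 ≤ fA) :
    pvLoopA fA (hiN : Int) (loN : Int) 0 0 =
      (PySem.List.pyRange 0 (pvND (hiN + 1) (hiN : Int) 0) 1).foldl
        (fun c k =>
          if PySem.Int.mod (hiN : Int) ((10 : Int) ^ (k + 1).toNat) <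
             PySem.Int.mod (loN : Int) ((10 : Int) ^ (k + 1).toNat) then c + 1 else c) 0 := by
  set D := pvNDN (hiN + 1) hiN with hD
  have hndi : pvND (hiN + 1) (hiN : Int) 0 = (D : Int) := by
    rw [pvND_eq_nat]; simp [hD]
  have hbound : hiN < 10 ^ D := pvNDN_bound (hiN + 1) hiN (by omega)
  -- A side
  have hAside : pvLoopA fA (hiN : Int) (loN : Int) 0 0 = ((pvLoopAN fA hiN loN 0 0 : Nat) : Int) := by
    simpa using pvLoopA_eq_nat fA hiN loN 0 0
  rw [hAside]
  have hAc := A_eq_count fA 0 D hiN loN 0 hle hbound (by omega) (by simpa using hfA)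
  simp only [pow_zero, Nat.div_one, Nat.mod_one, lt_irrefl, if_false, Nat.zero_add] at hAc
  -- B side
  rw [hndi, PySem.List.pyRange_one]
  have hB := B_fold_eq hiN loN (List.range ((D : Int) - 0).toNat) 0
  rw [hB]
  have hDn : ((D : Int) - 0).toNat = D := by omega
  rw [hDn, List.range_eq_range']
  rw [hAc]
  have : D - 0 = D := by omega
  rw [this]
  ring

lemma count_eq_alt (a b : Int) : count_borrows_py a b = count_borrows_py_alt a b := by
  unfold count_borrows_py count_borrows_py_alt
  set a1 := |a| with ha1
  set b1 := |b| with hb1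
  have hA : a1 = ((a.natAbs : Nat) : Int) := by rw [ha1, Int.natCast_natAbs]
  have hB : b1 = ((b.natAbs : Nat) : Int) := by rw [hb1, Int.natCast_natAbs]
  by_cases h : a1 < b1
  · have hge : ¬ (a1 ≥ b1) := by omega
    simp only [if_pos h, if_neg hge]
    rw [hA, hB]
    simp only [Int.natAbs_natCast]
    exact count_eq_core b.natAbs a.natAbs (by rw [hA, hB] at h; exact_mod_cast le_of_lt h)
      (b.natAbs + a.natAbs + 1) (by omega)
  · have hge : a1 ≥ b1 := by omega
    simp only [if_neg h, if_pos hge]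
    rw [hA, hB]
    simp only [Int.natAbs_natCast]
    exact count_eq_core a.natAbs b.natAbs (by rw [hA, hB] at hge; exact_mod_cast hge)
      (a.natAbs + b.natAbs + 1) (by omega)

-- ===== VERDICT (by name: the statement is the Claim_ definition above) =====
theorem count_borrows_py_spec : Claim_equal_count_borrows_py := by
  intro a b _
  unfold Spec_count_borrows_py
  exact count_eq_alt a b
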